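-- pv_equiv track=rewrite | github.com/surftemp/netcdf_explorer | src/netcdf2html/cli/main.py | strip_json5_comments
-- ===== SOURCE A (Python) =====
-- def strip_json5_comments(original):
--     # perform a minimal filtering of // comments (a subset of JSON5) and return a JSON compatible string
--     lines = original.split("\n")
--     parsed = ""
--     for line in lines:
--         line = line.rstrip()
--         inq = False
--         for idx in range(len(line) - 1):
--             if line[idx] == '"':
--                 inq = not inq
--             else:
--                 if not inq:
--                     if line[idx:idx + 2] == "//":
--                         line = line[:idx].rstrip()  # cut off comment
--                         break
--         if line:
--             if parsed:
--                 parsed += "\n"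
--             parsed += line
--     return parsed
-- ===== SOURCE B (Python) =====
-- def _uncommented(line):
--     # cut line at the first "//" that lies outside double quotes, then rstrip
--     off = 0
--     for i, seg in enumerate(line.split('"')):
--         if i % 2 == 0:
--             j = seg.find("//")
--             if j >= 0:
--                 return line[:off + j].rstrip()
--         off += len(seg) + 1
--     return line
--
-- def strip_json5_comments(original):
--     lines = (_uncommented(raw.rstrip()) for raw in original.split("\n"))
--     return "\n".join(l for l in lines if l)
-- ===== Notes on version B (the rewrite author's own statement) =====
-- stated objective: faster
-- what changed: Replaces A's per-character scan with an in-quotes flag by splitting each line on the double-quote character and searching for the comment marker only in the even-indexed (outside-quotes) segments, computing the cut position from a running segment offset.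
import Mathlib
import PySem

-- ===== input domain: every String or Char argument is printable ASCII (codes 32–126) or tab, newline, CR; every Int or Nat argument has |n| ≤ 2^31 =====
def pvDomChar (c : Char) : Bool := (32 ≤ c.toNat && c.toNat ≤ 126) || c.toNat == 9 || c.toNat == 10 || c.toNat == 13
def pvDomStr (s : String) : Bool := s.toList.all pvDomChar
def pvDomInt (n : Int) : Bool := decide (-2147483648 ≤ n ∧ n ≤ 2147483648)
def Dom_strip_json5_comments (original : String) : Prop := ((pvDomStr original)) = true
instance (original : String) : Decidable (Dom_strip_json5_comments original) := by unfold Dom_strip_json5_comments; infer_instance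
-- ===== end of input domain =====

-- B restructures A's stateful character scan: it splits each line on the double-quote character
-- and searches for the comment marker only in the even-indexed (outside-quotes) segments, with a
-- running segment offset (measured faster in a timing run: the work moves into str.split/str.find).

-- ===== PORT A =====
/-- A's inner `for idx in range(len(line)-1)` loop: `pre = line[:idx]`, the second argument is
    `line[idx:]`; the loop runs while `idx < len(line) - 1`, i.e. while at least two chars remain,
    and there `line[idx:idx+2] == "//"` is exactly `c = '/' ∧ c2 = '/'`. -/
def aCommentLoop : List Char → List Char → Bool → List Char
  | pre, c :: c2 :: rest, inq =>
    if c = '"' then aCommentLoop (pre ++ [c]) (c2 :: rest) (!inq)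
    else if inq = false ∧ c = '/' ∧ c2 = '/' then PySem.Chars.rstrip pre
    else aCommentLoop (pre ++ [c]) (c2 :: rest) inq
  | pre, rest, _ => pre ++ rest

def strip_json5_comments (original : String) : String :=
  String.ofList <|
    (PySem.Chars.splitOn original.toList ['\n']).foldl
      (fun parsed line0 =>
        let line := aCommentLoop [] (PySem.Chars.rstrip line0) false
        if line ≠ [] then (if parsed ≠ [] then parsed ++ ['\n'] else parsed) ++ line
        else parsed) []

-- ===== PORT B =====
/-- B's `for i, seg in enumerate(line.split('"'))` loop, returning the cut position (if any). -/
def bSegLoop : List (List Char) → Nat → Nat → Option Nat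
  | [], _, _ => none
  | seg :: rest, i, off =>
    if i % 2 = 0 then
      let j := PySem.Chars.find seg ['/', '/']
      if 0 ≤ j then some (off + j.toNat)
      else bSegLoop rest (i + 1) (off + seg.length + 1)
    else bSegLoop rest (i + 1) (off + seg.length + 1)

/-- B's `_uncommented`; `line[:k]` for `0 ≤ k` is `List.take k`. -/
def bUncommented (line : List Char) : List Char :=
  match bSegLoop (PySem.Chars.splitOn line ['"']) 0 0 with
  | some p => PySem.Chars.rstrip (line.take p)
  | none => line

def strip_json5_comments_alt (original : String) : String :=
  String.ofList <| PySem.Chars.join ['\n']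
    (((PySem.Chars.splitOn original.toList ['\n']).map
        (fun raw => bUncommented (PySem.Chars.rstrip raw))).filter (· ≠ []))

-- ===== PRECONDITION & SPEC =====
def Spec_strip_json5_comments (original : String) (out : String) : Prop := out = strip_json5_comments_alt original
instance (original : String) (out : String) : Decidable (Spec_strip_json5_comments original out) := by unfold Spec_strip_json5_comments; infer_instance

-- ===== CLAIM (what is proved, stated in full; the proofs are below) =====
def Claim_equal_strip_json5_comments : Prop := ∀ (original : String), Dom_strip_json5_comments original → Spec_strip_json5_comments original (strip_json5_comments original)

-- ===== LEMMAS AND PROOFS =====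

/-- first index of an outside-quotes "//" in a line, found by A's quote-flag scan (reference). -/
def scanFind : List Char → Bool → Option Nat
  | c :: c2 :: rest, inq =>
    if c = '"' then (scanFind (c2 :: rest) (!inq)).map (· + 1)
    else if inq = false ∧ c = '/' ∧ c2 = '/' then some 0
    else (scanFind (c2 :: rest) inq).map (· + 1)
  | _, _ => none
def find2 : List Char → Option Nat
  | c :: c2 :: rest => if c = '/' ∧ c2 = '/' then some 0 else (find2 (c2 :: rest)).map (· + 1)
  | _ => none
def mySplit (q : Char) : List Char → List (List Char)
  | [] => [[]]
  | c :: rest =>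
    match mySplit q rest with
    | s :: t => if c = q then [] :: s :: t else (c :: s) :: t
    | [] => [[c]]


theorem mySplit_ne_nil (q : Char) (l : List Char) : mySplit q l ≠ [] := by
  cases l with
  | nil => simp [mySplit]
  | cons c rest =>
    unfold mySplit
    cases mySplit q rest with
    | nil => simp
    | cons s t => dsimp only; split <;> simp

theorem aCommentLoop_eq_scanFind (rest pre : List Char) (inq : Bool) :
    aCommentLoop pre rest inq =
      match scanFind rest inq with
      | some j => PySem.Chars.rstrip (pre ++ rest.take j)
      | none => pre ++ rest := by
  induction pre, rest, inq using aCommentLoop.induct with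
  | case1 pre c2 rest inq ih =>
    rw [aCommentLoop, if_pos rfl]
    rw [ih]
    simp only [scanFind]
    cases scanFind (c2 :: rest) (!inq) with
    | none => simp
    | some j => simp [List.take_succ_cons]
  | case2 pre c c2 rest inq hc hm =>
    rw [aCommentLoop, if_neg hc, if_pos hm]
    simp only [scanFind, if_neg hc, if_pos hm]
    simp
  | case3 pre c c2 rest inq hc hm ih =>
    rw [aCommentLoop, if_neg hc, if_neg hm]
    rw [ih]
    simp only [scanFind, if_neg hc, if_neg hm]
    cases scanFind (c2 :: rest) inq with
    | none => simp
    | some j => simp [List.take_succ_cons]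
  | case4 pre rest inq h =>
    have hs : scanFind rest inq = none := by
      cases rest with
      | nil => rfl
      | cons a t =>
        cases t with
        | nil => rfl
        | cons b t' => exact (h a b t' rfl).elim
    rw [hs]
    cases rest with
    | nil => rfl
    | cons a t =>
      cases t with
      | nil => rfl
      | cons b t' => exact (h a b t' rfl).elim

theorem scanFind_cons_quote (rest : List Char) (b : Bool) :
    scanFind ('"' :: rest) b = (scanFind rest (!b)).map (· + 1) := by
  cases rest with
  | nil => rfl
  | cons c r => simp [scanFind]

theorem scanFind_noquote_false (a : List Char) (ha : '"' ∉ a) :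
    scanFind a false = find2 a := by
  induction a using find2.induct with
  | case1 c c2 r hm =>
    have hc : c ≠ '"' := by intro h; exact ha (by simp [h])
    simp [scanFind, find2, hm.1, hm.2]
  | case2 c c2 r hm ih =>
    have hc : c ≠ '"' := by intro h; exact ha (by simp [h])
    have ha' : '"' ∉ c2 :: r := fun h => ha (List.mem_cons_of_mem _ h)
    simp [scanFind, find2, hc, hm, ih ha']
  | case3 l h =>
    cases l with
    | nil => rfl
    | cons a t =>
      cases t with
      | nil => rfl
      | cons b t' => exact (h a b t' rfl).elim

theorem scanFind_noquote_true (a : List Char) (ha : '"' ∉ a) :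
    scanFind a true = none := by
  induction a with
  | nil => rfl
  | cons c r ih =>
    have hc : c ≠ '"' := by intro h; exact ha (by simp [h])
    have ha' : '"' ∉ r := fun h => ha (List.mem_cons_of_mem _ h)
    cases r with
    | nil => rfl
    | cons c2 r' => simp [scanFind, hc, ih ha']

theorem scanFind_decomp_false (a rest : List Char) (ha : '"' ∉ a) :
    scanFind (a ++ '"' :: rest) false =
      match find2 a with
      | some j => some j
      | none => (scanFind rest true).map (· + (a.length + 1)) := by
  induction a with
  | nil =>
    simp only [List.nil_append, find2]
    rw [scanFind_cons_quote]
    simp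
  | cons c a' ih =>
    have hc : c ≠ '"' := by intro h; exact ha (by simp [h])
    have ha' : '"' ∉ a' := fun h => ha (List.mem_cons_of_mem _ h)
    cases a' with
    | nil =>
      simp only [List.cons_append, List.nil_append, find2]
      rw [show scanFind (c :: '"' :: rest) false
            = (scanFind ('"' :: rest) false).map (· + 1) by
          simp [scanFind, hc]]
      rw [scanFind_cons_quote]
      simp only [Option.map_map, Bool.not_false]
      cases scanFind rest true with
      | none => rfl
      | some j => simp
    | cons c2 a'' =>
      have ihx := ih ha'
      simp only [List.cons_append] at ihx
      by_cases hm : c = '/' ∧ c2 = '/'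
      · simp [scanFind, find2, hm.1, hm.2]
      · have hstep : scanFind (c :: c2 :: (a'' ++ '"' :: rest)) false
            = (scanFind (c2 :: (a'' ++ '"' :: rest)) false).map (· + 1) := by
          simp [scanFind, hc, hm]
        simp only [List.cons_append, find2, if_neg hm]
        rw [hstep, ihx]
        cases hf : find2 (c2 :: a'') with
        | some j => simp
        | none =>
          simp only [Option.map_map]
          cases scanFind rest true with
          | none => rfl
          | some j => simp [Function.comp_def]; try omega

theorem scanFind_decomp_true (a rest : List Char) (ha : '"' ∉ a) :
    scanFind (a ++ '"' :: rest) true =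
      (scanFind rest false).map (· + (a.length + 1)) := by
  induction a with
  | nil =>
    simp only [List.nil_append]
    rw [scanFind_cons_quote]
    simp
  | cons c a' ih =>
    have hc : c ≠ '"' := by intro h; exact ha (by simp [h])
    have ha' : '"' ∉ a' := fun h => ha (List.mem_cons_of_mem _ h)
    cases a' with
    | nil =>
      simp only [List.cons_append, List.nil_append]
      rw [show scanFind (c :: '"' :: rest) true
            = (scanFind ('"' :: rest) true).map (· + 1) by
          simp [scanFind, hc]]
      rw [scanFind_cons_quote]
      simp only [Option.map_map, Bool.not_true]
      cases scanFind rest false with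
      | none => rfl
      | some j => simp [Function.comp_def]; try omega
    | cons c2 a'' =>
      have ihx := ih ha'
      simp only [List.cons_append] at ihx
      have hstep : scanFind (c :: c2 :: (a'' ++ '"' :: rest)) true
          = (scanFind (c2 :: (a'' ++ '"' :: rest)) true).map (· + 1) := by
        simp [scanFind, hc]
      simp only [List.cons_append]
      rw [hstep, ihx]
      simp only [Option.map_map]
      cases scanFind rest false with
      | none => rfl
      | some j => simp [Function.comp_def]; try omega

theorem mySplit_noquote (q : Char) (l : List Char) (hl : q ∉ l) :
    mySplit q l = [l] := by
  induction l with
  | nil => rfl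
  | cons c r ih =>
    have hc : c ≠ q := by intro h; exact hl (by simp [h])
    have hr : q ∉ r := fun h => hl (List.mem_cons_of_mem _ h)
    simp only [mySplit, ih hr]
    simp [hc]

theorem mySplit_decomp (q : Char) (a rest : List Char) (ha : q ∉ a) :
    mySplit q (a ++ q :: rest) = a :: mySplit q rest := by
  induction a with
  | nil =>
    simp only [List.nil_append, mySplit]
    cases h : mySplit q rest with
    | nil => exact absurd h (mySplit_ne_nil q rest)
    | cons s t => simp
  | cons c a' ih =>
    have hc : c ≠ q := by intro h; exact ha (by simp [h])
    have ha' : q ∉ a' := fun h => ha (List.mem_cons_of_mem _ h)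
    simp only [List.cons_append, mySplit, ih ha']
    simp [hc]

theorem splitOn_go_spec (q : Char) (fuel : Nat) :
    ∀ (l cur : List Char) (acc : List (List Char)), l.length ≤ fuel →
      PySem.Chars.splitOn.go [q] fuel l cur acc =
        acc.reverse ++
          (match mySplit q l with
           | s :: t => (cur.reverse ++ s) :: t
           | [] => []) := by
  induction fuel with
  | zero =>
    intro l cur acc hl
    have : l = [] := List.length_eq_zero_iff.mp (Nat.le_zero.mp hl)
    subst this
    simp [PySem.Chars.splitOn.go, mySplit]
  | succ fuel ih =>
    intro l cur acc hl
    cases l with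
    | nil => simp [PySem.Chars.splitOn.go, mySplit]
    | cons c rest =>
      rw [PySem.Chars.splitOn.go]
      by_cases hc : c = q
      · subst hc
        rw [if_pos (by simp [List.isPrefixOf])]
        simp only [List.length_cons] at hl
        rw [show List.drop [c].length (c :: rest) = rest by simp]
        rw [ih rest [] (cur.reverse :: acc) (Nat.le_of_succ_le_succ hl)]
        simp only [mySplit]
        cases h : mySplit c rest with
        | nil => exact absurd h (mySplit_ne_nil c rest)
        | cons s t => simp
      · rw [if_neg (by simp [List.isPrefixOf]; exact fun h => hc h.symm)]
        simp only [List.length_cons] at hl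
        rw [ih rest (c :: cur) acc (Nat.le_of_succ_le_succ hl)]
        simp only [mySplit]
        cases h : mySplit q rest with
        | nil => exact absurd h (mySplit_ne_nil q rest)
        | cons s t => simp [hc]

theorem splitOn_eq_mySplit (q : Char) (l : List Char) :
    PySem.Chars.splitOn l [q] = mySplit q l := by
  show PySem.Chars.splitOn.go [q] (l.length + 1) l [] [] = mySplit q l
  rw [splitOn_go_spec q (l.length + 1) l [] [] (Nat.le_succ _)]
  cases h : mySplit q l with
  | nil => exact absurd h (mySplit_ne_nil q l)
  | cons s t => simp

theorem find_go_slash (seg : List Char) : ∀ k : Nat,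
    PySem.Chars.find.go ['/', '/'] seg k =
      match find2 seg with
      | some j => ((k : Int) + j)
      | none => -1 := by
  induction seg with
  | nil => intro k; rfl
  | cons c t ih =>
    intro k
    cases t with
    | nil =>
      rw [PySem.Chars.find.go]
      rw [if_neg (by simp [List.isPrefixOf])]
      rfl
    | cons c2 r =>
      rw [PySem.Chars.find.go]
      by_cases hm : c = '/' ∧ c2 = '/'
      · rw [if_pos (by simp [List.isPrefixOf, hm.1, hm.2])]
        simp [find2, hm]
      · rw [if_neg (by simp [List.isPrefixOf]; intro h1 h2; exact absurd ⟨h1.symm, h2.symm⟩ hm)]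
        rw [ih (k + 1)]
        simp only [find2, if_neg hm]
        cases find2 (c2 :: r) with
        | none => rfl
        | some j => simp only [Option.map_some]; push_cast; ring

theorem find_slash (seg : List Char) :
    PySem.Chars.find seg ['/', '/'] =
      match find2 seg with
      | some j => (j : Int)
      | none => -1 := by
  show PySem.Chars.find.go ['/', '/'] seg 0 = _
  rw [find_go_slash seg 0]
  cases find2 seg with
  | none => rfl
  | some j => simp

theorem exists_quote_split (l : List Char) (hq : '"' ∈ l) :
    ∃ a rest, l = a ++ '"' :: rest ∧ '"' ∉ a := by
  induction l with
  | nil => simp at hq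
  | cons c t ih =>
    by_cases hc : c = '"'
    · exact ⟨[], t, by simp [hc], by simp⟩
    · have hm : '"' ∈ t := by
        rcases List.mem_cons.mp hq with h | h
        · exact absurd h.symm hc
        · exact h
      obtain ⟨a, rest, h1, h2⟩ := ih hm
      refine ⟨c :: a, rest, by simp [h1], ?_⟩
      intro h
      rcases List.mem_cons.mp h with h3 | h3
      · exact hc h3.symm
      · exact h2 h3


theorem bSegLoop_eq_scanFind : ∀ (n : Nat) (l : List Char) (i off : Nat), l.length ≤ n →
    bSegLoop (mySplit '"' l) i off = (scanFind l (decide (i % 2 = 1))).map (· + off) := by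
  intro n
  induction n with
  | zero =>
    intro l i off hl
    have : l = [] := List.length_eq_zero_iff.mp (Nat.le_zero.mp hl)
    subst this
    by_cases hi : i % 2 = 0
    · simp [mySplit, bSegLoop, hi, find_slash, find2, scanFind]
    · simp [mySplit, bSegLoop, hi, scanFind]
  | succ n ih =>
    intro l i off hl
    by_cases hq : '"' ∈ l
    · obtain ⟨a, rest, hsplit, ha⟩ := exists_quote_split l hq
      subst hsplit
      rw [mySplit_decomp _ _ _ ha]
      have hlen : rest.length ≤ n := by
        simp [List.length_append] at hl
        omega
      by_cases hi : i % 2 = 0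
      · simp only [bSegLoop, if_pos hi]
        rw [show decide (i % 2 = 1) = false by simp; omega]
        rw [scanFind_decomp_false a rest ha]
        rw [find_slash a]
        cases hf : find2 a with
        | some j =>
          rw [if_pos (by simp)]
          simp
          omega
        | none =>
          rw [if_neg (by norm_num)]
          rw [ih rest (i + 1) (off + a.length + 1) hlen]
          rw [show decide ((i + 1) % 2 = 1) = true by simp; omega]
          simp only [Option.map_map]
          cases scanFind rest true with
          | none => rfl
          | some j => simp [Function.comp_def]; try omega
      · simp only [bSegLoop, if_neg hi]
        rw [ih rest (i + 1) (off + a.length + 1) hlen]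
        rw [show decide ((i + 1) % 2 = 1) = false by simp; omega]
        rw [show decide (i % 2 = 1) = true by simp; omega]
        rw [scanFind_decomp_true a rest ha]
        simp only [Option.map_map]
        cases scanFind rest false with
        | none => rfl
        | some j => simp [Function.comp_def]; try omega
    · rw [mySplit_noquote _ _ hq]
      by_cases hi : i % 2 = 0
      · simp only [bSegLoop, if_pos hi]
        rw [find_slash l]
        rw [show decide (i % 2 = 1) = false by simp; omega]
        rw [scanFind_noquote_false l hq]
        cases hf : find2 l with
        | some j =>
          rw [if_pos (by simp)]
          simp
          omega
        | none =>
          rw [if_neg (by norm_num)]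
          simp
      · simp only [bSegLoop, if_neg hi]
        rw [show decide (i % 2 = 1) = true by simp; omega]
        rw [scanFind_noquote_true l hq]
        simp

theorem perLine (l : List Char) :
    aCommentLoop [] l false = bUncommented l := by
  rw [aCommentLoop_eq_scanFind l [] false]
  unfold bUncommented
  rw [splitOn_eq_mySplit]
  rw [bSegLoop_eq_scanFind l.length l 0 0 le_rfl]
  rw [show decide ((0 : Nat) % 2 = 1) = false by simp]
  cases scanFind l false with
  | none => simp
  | some j => simp

theorem join_cons (sep : List Char) (x : List Char) (xs : List (List Char)) :
    PySem.Chars.join sep (x :: xs) = x ++ xs.flatMap (fun l => sep ++ l) := by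
  induction xs generalizing x with
  | nil => simp [PySem.Chars.join, List.intercalate]
  | cons y ys ih =>
    have h1 : PySem.Chars.join sep (x :: y :: ys) = x ++ sep ++ PySem.Chars.join sep (y :: ys) := by
      simp [PySem.Chars.join, List.intercalate]
    rw [h1, ih y]
    simp [List.flatMap_cons, List.append_assoc]

theorem foldl_phase2 (f : List Char → List Char) (lines : List (List Char)) :
    ∀ parsed : List Char, parsed ≠ [] →
      lines.foldl
        (fun parsed line0 =>
          let line := f line0
          if line ≠ [] then (if parsed ≠ [] then parsed ++ ['\n'] else parsed) ++ line
          else parsed) parsed =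
      parsed ++ ((lines.map f).filter (· ≠ [])).flatMap (fun l => '\n' :: l) := by
  induction lines with
  | nil => intro parsed _; simp
  | cons line rest ih =>
    intro parsed hp
    simp only [List.foldl_cons, List.map_cons]
    by_cases hv : f line = []
    · rw [if_neg (by simpa using hv)]
      rw [ih parsed hp]
      simp [hv]
    · rw [if_pos (by simpa using hv), if_pos (by simpa using hp)]
      rw [ih (parsed ++ ['\n'] ++ f line) (by simp)]
      rw [List.filter_cons, if_pos (by simpa using hv)]
      simp [List.append_assoc]

theorem foldl_phase1 (f : List Char → List Char) (lines : List (List Char)) :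
    lines.foldl
      (fun parsed line0 =>
        let line := f line0
        if line ≠ [] then (if parsed ≠ [] then parsed ++ ['\n'] else parsed) ++ line
        else parsed) [] =
    PySem.Chars.join ['\n'] ((lines.map f).filter (· ≠ [])) := by
  induction lines with
  | nil => simp [PySem.Chars.join, List.intercalate]
  | cons line rest ih =>
    simp only [List.foldl_cons, List.map_cons]
    by_cases hv : f line = []
    · rw [if_neg (by simpa using hv)]
      rw [ih]
      simp [hv]
    · rw [if_pos (by simpa using hv), if_neg (by simp)]
      rw [List.nil_append]
      rw [foldl_phase2 f rest (f line) hv]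
      rw [List.filter_cons, if_pos (by simpa using hv)]
      rw [join_cons]
      simp

-- ===== VERDICT (by name: the statement is the Claim_ definition above) =====
theorem strip_json5_comments_spec : Claim_equal_strip_json5_comments := by
  intro original _
  unfold Spec_strip_json5_comments strip_json5_comments strip_json5_comments_alt
  congr 1
  have hfun : (fun (parsed line0 : List Char) =>
        let line := aCommentLoop [] (PySem.Chars.rstrip line0) false
        if line ≠ [] then (if parsed ≠ [] then parsed ++ ['\n'] else parsed) ++ line
        else parsed)
      = (fun (parsed line0 : List Char) =>
        let line := (fun raw => bUncommented (PySem.Chars.rstrip raw)) line0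
        if line ≠ [] then (if parsed ≠ [] then parsed ++ ['\n'] else parsed) ++ line
        else parsed) := by
    funext parsed line0
    simp only [perLine]
  rw [hfun, foldl_phase1 (fun raw => bUncommented (PySem.Chars.rstrip raw))]
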